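-- pv_equiv track=rewrite | github.com/SwathiBalasubramanyam/dsapython | leetgoat/prefix_sum/3096_min_levels_to_win.py | minimumLevels
-- ===== SOURCE A (Python) =====
-- from typing import List
--
-- def minimumLevels(possible: List[int]) -> int:
--     prefix_sum = []
--
--     start = 0
--     for ele in possible:
--         if ele == 0:
--             ele = -1
--         start += ele
--         prefix_sum.append(start)
--
--     for idx, alice_score in enumerate(prefix_sum):
--         level = idx+1
--         bobs_score = prefix_sum[-1] - alice_score
--         if alice_score > bobs_score:
--             return level
--
--     return -1
-- ===== SOURCE B (Python) =====
-- def minimumLevels(possible):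
--     total = 0
--     for e in possible:
--         total += -1 if e == 0 else e
--     ans = -1
--     suf = 0
--     level = len(possible)
--     for e in reversed(possible):
--         if total > 2 * suf:
--             ans = level
--         suf += -1 if e == 0 else e
--         level -= 1
--     return ans
-- ===== Notes on version B (the rewrite author's own statement) =====
-- stated objective: alternative
-- what changed: B replaces A's prefix-sum list and forward first-hit scan by a backward suffix-sum traversal: it computes the grand total once, then walks the levels right-to-left maintaining only the running suffix sum, marking a level whenever total > 2*suffix and letting later (more-left) writes win, so the leftmost qualifying level survives; no prefix value is ever formed.
import Mathlib
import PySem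

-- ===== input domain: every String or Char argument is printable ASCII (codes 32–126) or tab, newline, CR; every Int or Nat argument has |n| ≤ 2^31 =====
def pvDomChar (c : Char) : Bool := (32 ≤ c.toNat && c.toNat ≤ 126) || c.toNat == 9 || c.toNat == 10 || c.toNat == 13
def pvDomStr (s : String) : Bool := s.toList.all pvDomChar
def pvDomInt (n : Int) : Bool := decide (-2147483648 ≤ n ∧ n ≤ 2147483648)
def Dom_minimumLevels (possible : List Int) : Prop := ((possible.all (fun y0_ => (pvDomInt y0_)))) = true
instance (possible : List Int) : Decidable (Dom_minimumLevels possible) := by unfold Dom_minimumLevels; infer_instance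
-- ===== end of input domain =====

-- B replaces the prefix-sum list and forward first-hit scan by a backward suffix-sum traversal (total computed once, leftmost qualifying level survives by overwrite); same O(n) time, O(1) extra space.

-- ===== PORT A =====
-- first loop of A: running sum 'start' (0 mapped to -1) and the prefix_sum list being appended to
def pvStepA (st : Int × List Int) (ele : Int) : Int × List Int :=
  let e := if ele = 0 then -1 else ele
  (st.1 + e, st.2 ++ [st.1 + e])

-- second loop of A over enumerate(prefix_sum); prefix_sum[-1] is recomputed each iteration
-- (.getD 0 is never the 'none' case: the loop body only runs when pfx is nonempty)
def pvFindA (pfx : List Int) : List (Int × Int) → Int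
  | [] => -1
  | (idx, alice) :: rest =>
      let level := idx + 1
      let bob := (PySem.List.pyGet? pfx (-1)).getD 0 - alice
      if alice > bob then level else pvFindA pfx rest

def minimumLevels (possible : List Int) : Int :=
  let pfx := (possible.foldl pvStepA (0, [])).2
  pvFindA pfx (PySem.List.enumerate pfx 0)

-- ===== PORT B =====
-- one step of B's backward loop over reversed(possible): state (ans, suf, level)
def pvStepB (total : Int) (st : Int × Int × Int) (e : Int) : Int × Int × Int :=
  ((if total > 2 * st.2.1 then st.2.2 else st.1),
   st.2.1 + (if e = 0 then -1 else e),
   st.2.2 - 1)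

def minimumLevels_alt (possible : List Int) : Int :=
  let total := possible.foldl (fun t e => t + (if e = 0 then -1 else e)) 0
  (possible.reverse.foldl (pvStepB total) (-1, 0, (possible.length : Int))).1

-- ===== PRECONDITION & SPEC =====
def Spec_minimumLevels (possible : List Int) (out : Int) : Prop := out = minimumLevels_alt possible
instance (possible : List Int) (out : Int) : Decidable (Spec_minimumLevels possible out) := by unfold Spec_minimumLevels; infer_instance

-- ===== CLAIM (what is proved, stated in full; the proofs are below) =====
def Claim_equal_minimumLevels : Prop := ∀ (possible : List Int), Dom_minimumLevels possible → Spec_minimumLevels possible (minimumLevels possible)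

-- ===== LEMMAS AND PROOFS =====

-- the transformed value (0 ↦ -1)
def pvF (e : Int) : Int := if e = 0 then -1 else e

def pvSumf : List Int → Int
  | [] => 0
  | e :: r => pvF e + pvSumf r

-- the prefix list A's first loop produces, starting from running sum s
def pvPfx (s : Int) : List Int → List Int
  | [] => []
  | e :: r => (s + pvF e) :: pvPfx (s + pvF e) r

def pvSum (s : Int) (l : List Int) : Int := l.foldl (fun t e => t + pvF e) s

theorem pvSum_cons (s e : Int) (r : List Int) : pvSum s (e :: r) = pvSum (s + pvF e) r := rfl

theorem pvSum_eq (l : List Int) : ∀ s, pvSum s l = s + pvSumf l := by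
  induction l with
  | nil => intro s; simp [pvSum, pvSumf]
  | cons e r ih => intro s; rw [pvSum_cons, ih, pvSumf]; ring

-- forward first-satisfier: alice = running prefix, bob = total - alice (the comparison A makes)
def pvScan (t : Int) : Int → Int → List Int → Int
  | _, _, [] => -1
  | s, k, e :: r =>
      let a := s + pvF e
      if a > t - a then k else pvScan t a (k + 1) r

-- characterisation of A's first loop
theorem pvFoldA (l : List Int) : ∀ (s : Int) (acc : List Int),
    l.foldl pvStepA (s, acc) = (pvSum s l, acc ++ pvPfx s l) := by
  induction l with
  | nil => intro s acc; simp [pvSum, pvPfx]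
  | cons e r ih =>
      intro s acc
      simp only [List.foldl_cons, pvStepA, pvPfx, pvSum_cons]
      rw [ih]
      simp [pvF]

-- last element of the prefix list is the grand total
theorem pvPfx_last (l : List Int) : ∀ (s : Int), l ≠ [] →
    ((pvPfx s l).getLast?).getD 0 = pvSum s l := by
  induction l with
  | nil => intro s h; exact absurd rfl h
  | cons e r ih =>
      intro s _
      cases r with
      | nil => simp [pvPfx, pvSum, pvF]
      | cons e2 r2 =>
          have := ih (s + pvF e) (by simp)
          simpa [pvPfx, pvSum_cons, List.getLast?_cons_cons] using this

-- A's search loop over enumerate(pvPfx s l) equals the forward first-satisfier scan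
theorem pvFind_eq (l : List Int) : ∀ (s : Int) (k : Int) (pfx : List Int) (t : Int),
    (PySem.List.pyGet? pfx (-1)).getD 0 = t →
    pvFindA pfx (PySem.List.enumerate (pvPfx s l) k) = pvScan t s (k + 1) l := by
  induction l with
  | nil => intro s k pfx t _; simp [pvPfx, pvFindA, pvScan]
  | cons e r ih =>
      intro s k pfx t ht
      simp only [pvPfx, PySem.List.enumerate_cons, pvFindA, pvScan, ht]
      by_cases h : s + pvF e > t - (s + pvF e)
      · rw [if_pos h, if_pos h]
      · rw [if_neg h, if_neg h]
        exact ih (s + pvF e) (k + 1) pfx t ht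

theorem minimumLevels_eq_scan (possible : List Int) :
    minimumLevels possible = pvScan (pvSumf possible) 0 1 possible := by
  show pvFindA ((possible.foldl pvStepA (0, [])).2)
        (PySem.List.enumerate ((possible.foldl pvStepA (0, [])).2) 0)
     = pvScan (pvSumf possible) 0 1 possible
  rw [pvFoldA possible 0 []]
  cases possible with
  | nil => simp [pvPfx, pvFindA, pvScan]
  | cons e r =>
      have ht : (PySem.List.pyGet? (List.nil ++ pvPfx 0 (e :: r)) (-1)).getD 0 = pvSumf (e :: r) := by
        rw [PySem.List.pyGet?_neg_one]
        have := pvPfx_last (e :: r) 0 (by simp)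
        rw [pvSum_eq] at this
        simpa using this
      simpa using pvFind_eq (e :: r) 0 0 (List.nil ++ pvPfx 0 (e :: r)) (pvSumf (e :: r)) ht

-- leftmost satisfier expressed through suffix sums (what B's backward overwrite computes)
def pvBF (t s0 : Int) : Int → List Int → Int → Int
  | _, [], a0 => a0
  | k, _e :: r, a0 => if t > 2 * (s0 + pvSumf r) then k else pvBF t s0 (k + 1) r a0

-- B's backward fold (as a foldr) computes pvBF
theorem pvFoldB (t : Int) (l : List Int) : ∀ (a0 s0 m : Int),
    l.foldr (fun e st => pvStepB t st e) (a0, s0, m)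
      = (pvBF t s0 (m - l.length + 1) l a0, s0 + pvSumf l, m - l.length) := by
  induction l with
  | nil => intro a0 s0 m; simp [pvBF, pvSumf]
  | cons e r ih =>
      intro a0 s0 m
      rw [List.foldr_cons, ih]
      simp only [pvStepB, List.length_cons, Prod.mk.injEq]
      refine ⟨?_, ?_, ?_⟩
      · rw [show (m : Int) - ↑(r.length + 1) + 1 = m - ↑r.length from by push_cast; ring]
        rfl
      · show s0 + pvSumf r + (if e = 0 then -1 else e) = s0 + pvSumf (e :: r)
        simp [pvSumf, pvF]; ring
      · push_cast; ring

-- the forward scan and the suffix-sum leftmost satisfier agree when prefix + suffix = total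
theorem pvScan_eq_BF (l : List Int) : ∀ (s s0 k t : Int), s + s0 + pvSumf l = t →
    pvScan t s k l = pvBF t s0 k l (-1) := by
  induction l with
  | nil => intro s s0 k t _; simp [pvScan, pvBF]
  | cons e r ih =>
      intro s s0 k t h
      have hsum : s + pvF e + s0 + pvSumf r = t := by
        simp only [pvSumf] at h; omega
      show (if s + pvF e > t - (s + pvF e) then k else pvScan t (s + pvF e) (k + 1) r)
         = (if t > 2 * (s0 + pvSumf r) then k else pvBF t s0 (k + 1) r (-1))
      have hiff : (s + pvF e > t - (s + pvF e)) ↔ (t > 2 * (s0 + pvSumf r)) := by omega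
      by_cases hc : s + pvF e > t - (s + pvF e)
      · rw [if_pos hc, if_pos (hiff.mp hc)]
      · rw [if_neg hc, if_neg (fun hb => hc (hiff.mpr hb))]
        exact ih (s + pvF e) s0 (k + 1) t hsum

theorem minimumLevels_eq (possible : List Int) :
    minimumLevels possible = minimumLevels_alt possible := by
  have htot : possible.foldl (fun t e => t + (if e = 0 then -1 else e)) 0 = pvSumf possible := by
    have := pvSum_eq possible 0
    simpa [pvSum, pvF] using this
  show minimumLevels possible
     = (possible.reverse.foldl (pvStepB (possible.foldl (fun t e => t + (if e = 0 then -1 else e)) 0))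
         (-1, 0, (possible.length : Int))).1
  rw [htot, List.foldl_reverse, pvFoldB (pvSumf possible) possible (-1) 0 (possible.length : Int),
      minimumLevels_eq_scan possible]
  show pvScan (pvSumf possible) 0 1 possible
     = pvBF (pvSumf possible) 0 ((possible.length : Int) - ↑possible.length + 1) possible (-1)
  rw [show ((possible.length : Int) - ↑possible.length + 1) = 1 from by ring]
  exact pvScan_eq_BF possible 0 0 1 (pvSumf possible) (by ring)

-- ===== VERDICT (by name: the statement is the Claim_ definition above) =====
theorem minimumLevels_spec : Claim_equal_minimumLevels := by
  intro possible _
  unfold Spec_minimumLevels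
  exact minimumLevels_eq possible
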